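-- pv_equiv track=rewrite | github.com/Drogalion01/Codes-of-lifetime | _final_check.py | current
-- ===== SOURCE A (Python) =====
-- def current(n,h,k,a):
--     tmp=[(0,0)]*n
--     idx=[(0,0)]*n
--     for i in range(n):
--         itx=max(a[i:])
--         itn=min(a[:i+1])
--         idx[i]=(a.index(itx,i), a.index(itn,0,i+1))
--         tmp[i]=(itx,itn)
--     s=sum(a)
--     cy=h//s
--     time=cy*n+max(0,cy-1)*k
--     if h%s==0:
--         return time
--     if cy>0:
--         time+=k
--     rem=h%s
--     pref=[0]*(n+1)
--     for i in range(n):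
--         pref[i+1]=pref[i]+a[i]
--     for i in range(1,n+1):
--         hobe=pref[i]-tmp[i-1][1]+tmp[i-1][0]
--         if pref[i] >= rem or (hobe >= rem and idx[i-1].first != i-1):
--             time+=1
--             return time
--         time+=1
--     return time
-- ===== SOURCE B (Python) =====
-- def current(n, h, k, a):
--     s = sum(a)
--     cy = h // s
--     time = cy * n + max(0, cy - 1) * k
--     rem = h % s
--     if rem == 0:
--         return time
--     if cy > 0:
--         time += k
--     run = 0
--     for x in a[:max(n, 0)]:
--         run += x
--         time += 1
--         if run >= rem:
--             break
--     return time
-- ===== Notes on version B (the rewrite author's own statement) =====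
-- stated objective: faster
-- what changed: B drops A's quadratic per-index rescans (max(a[i:]), min(a[:i+1]), a.index, prefix table) entirely and answers with the cycle arithmetic plus a single running-sum pass over the first n elements; this is exact because on every input where A returns, A's extra 'hobe' branch can only raise (tuples have no attribute .first), so it never influences A's value.
import Mathlib
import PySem

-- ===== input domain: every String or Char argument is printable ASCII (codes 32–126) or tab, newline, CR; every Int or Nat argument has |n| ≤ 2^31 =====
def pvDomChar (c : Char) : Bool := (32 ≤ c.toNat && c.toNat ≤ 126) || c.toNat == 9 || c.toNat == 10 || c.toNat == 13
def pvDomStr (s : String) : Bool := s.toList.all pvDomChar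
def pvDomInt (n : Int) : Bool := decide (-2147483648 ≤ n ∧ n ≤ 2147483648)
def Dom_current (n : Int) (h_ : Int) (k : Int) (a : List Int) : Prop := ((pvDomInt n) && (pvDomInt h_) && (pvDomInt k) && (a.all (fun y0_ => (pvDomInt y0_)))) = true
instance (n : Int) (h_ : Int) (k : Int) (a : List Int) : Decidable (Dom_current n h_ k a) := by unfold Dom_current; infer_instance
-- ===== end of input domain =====

-- B replaces A's quadratic per-index rescans by cycle arithmetic plus one running-sum pass (objective: faster).

-- ===== PORT A =====
-- A's first loop: for i in range(n), fill tmp[i] and idx[i] (slot assignment into the preallocated list = append)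
def currentScan (a : List Int) (n : Int) : List (Int × Int) × List (Int × Int) :=
  (PySem.List.pyRange 0 n 1).foldl (fun (st : List (Int × Int) × List (Int × Int)) i =>
    let itx := (PySem.List.max? (PySem.List.slice a (some i) none) (fun y => y)).getD 0      -- max(a[i:]); .getD 0 only where Python raises ValueError (outside Pre_)
    let itn := (PySem.List.min? (PySem.List.slice a none (some (i + 1))) (fun y => y)).getD 0 -- min(a[:i+1])
    let ix1 : Int := i + ((PySem.List.index? (PySem.List.slice a (some i) none) itx).getD 0 : Nat)      -- a.index(itx, i)
    let ix2 : Int := ((PySem.List.index? (PySem.List.slice a none (some (i + 1))) itn).getD 0 : Nat)    -- a.index(itn, 0, i+1)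
    (st.1 ++ [(itx, itn)], st.2 ++ [(ix1, ix2)])) ([], [])

-- A's second loop: pref[i+1] = pref[i] + a[i]
def currentPref (a : List Int) (n : Int) : List Int :=
  (PySem.List.pyRange 0 n 1).foldl (fun p i =>
    p ++ [PySem.List.pyGetD p i 0 + PySem.List.pyGetD a i 0]) [0]

-- A's third loop; none where Python raises AttributeError (tuples have no attribute 'first')
def currentLoop (tmp : List (Int × Int)) (pref : List Int) (rem : Int) : List Int → Int → Option Int
  | [], time => some time
  | i :: rest, time =>
      let hobe := PySem.List.pyGetD pref i 0 - (PySem.List.pyGetD tmp (i - 1) (0, 0)).2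
                    + (PySem.List.pyGetD tmp (i - 1) (0, 0)).1
      if PySem.List.pyGetD pref i 0 ≥ rem then some (time + 1)
      else if hobe ≥ rem then none                      -- `idx[i-1].first` : AttributeError
      else currentLoop tmp pref rem rest (time + 1)

def current (n : Int) (h_ : Int) (k : Int) (a : List Int) : Int :=
  let st := currentScan a n
  let tmp := st.1
  let _idx := st.2                                      -- only ever read via the raising attribute access
  let s := a.sum
  if s = 0 then 0                                       -- ZeroDivisionError (outside Pre_)
  else
    let cy := PySem.Int.floordiv h_ s
    let time := cy * n + max 0 (cy - 1) * k
    if PySem.Int.mod h_ s = 0 then time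
    else
      let time := if cy > 0 then time + k else time
      let rem := PySem.Int.mod h_ s
      let pref := currentPref a n
      (currentLoop tmp pref rem (PySem.List.pyRange 1 (n + 1) 1) time).getD 0

-- ===== PORT B =====
def currentAltLoop (rem : Int) : List Int → Int → Int → Int
  | [], _, time => time
  | x :: rest, run, time =>
      let run := run + x
      let time := time + 1
      if run ≥ rem then time else currentAltLoop rem rest run time

def current_alt (n : Int) (h_ : Int) (k : Int) (a : List Int) : Int :=
  let s := a.sum
  if s = 0 then 0                                       -- ZeroDivisionError (outside Pre_)
  else
    let cy := PySem.Int.floordiv h_ s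
    let time := cy * n + max 0 (cy - 1) * k
    let rem := PySem.Int.mod h_ s
    if rem = 0 then time
    else
      let time := if cy > 0 then time + k else time
      currentAltLoop rem (PySem.List.slice a none (some (max n 0))) 0 time

-- ===== PRECONDITION & SPEC =====
-- Pre_ excludes exactly the inputs where A raises (sum(a)=0: ZeroDivisionError; n>len(a): ValueError on max of an
-- empty slice; the 'hobe' branch ever being reached: AttributeError on idx[i-1].first, since tuples have no
-- attribute 'first').
def Pre_current (n : Int) (h_ : Int) (k : Int) (a : List Int) : Prop :=
  n ≤ a.length ∧ a.sum ≠ 0 ∧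
  (PySem.Int.mod h_ a.sum = 0 ∨
    ∀ i ∈ List.range n.toNat,
      (∀ j ∈ List.range (i + 1), (a.take (j + 1)).sum < PySem.Int.mod h_ a.sum) →
      (a.take (i + 1)).sum - (PySem.List.min? (a.take (i + 1)) (fun y => y)).getD 0
        + (PySem.List.max? (a.drop i) (fun y => y)).getD 0 < PySem.Int.mod h_ a.sum)
instance (n : Int) (h_ : Int) (k : Int) (a : List Int) : Decidable (Pre_current n h_ k a) := by unfold Pre_current; infer_instance

def pvWitness_current : Int × Int × Int × List Int := (3, 10, 2, [3, 2, 1])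

def Spec_current (n : Int) (h_ : Int) (k : Int) (a : List Int) (out : Int) : Prop := out = current_alt n h_ k a
instance (n : Int) (h_ : Int) (k : Int) (a : List Int) (out : Int) : Decidable (Spec_current n h_ k a out) := by unfold Spec_current; infer_instance

-- ===== CLAIM (what is proved, stated in full; the proofs are below) =====
def Claim_equal_current : Prop := ∀ (n : Int) (h_ : Int) (k : Int) (a : List Int), Dom_current n h_ k a → Pre_current n h_ k a → Spec_current n h_ k a (current n h_ k a)

-- ===== LEMMAS AND PROOFS =====

theorem sum_take_succ' (L : List Int) (i : Nat) (h : i < L.length) :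
    (L.take (i+1)).sum = (L.take i).sum + L[i] := by
  rw [List.take_add_one, List.sum_append]
  simp [List.getElem?_eq_getElem h]

-- the first component of A's first loop only depends on the first accumulator
theorem scan_fst_general (a : List Int) : ∀ (l : List Int) (acc : List (Int × Int) × List (Int × Int)),
    (l.foldl (fun (st : List (Int × Int) × List (Int × Int)) i =>
      let itx := (PySem.List.max? (PySem.List.slice a (some i) none) (fun y => y)).getD 0
      let itn := (PySem.List.min? (PySem.List.slice a none (some (i + 1))) (fun y => y)).getD 0
      let ix1 : Int := i + ((PySem.List.index? (PySem.List.slice a (some i) none) itx).getD 0 : Nat)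
      let ix2 : Int := ((PySem.List.index? (PySem.List.slice a none (some (i + 1))) itn).getD 0 : Nat)
      (st.1 ++ [(itx, itn)], st.2 ++ [(ix1, ix2)])) acc).1
    = l.foldl (fun t i => t ++
        [((PySem.List.max? (PySem.List.slice a (some i) none) (fun y => y)).getD 0,
          (PySem.List.min? (PySem.List.slice a none (some (i + 1))) (fun y => y)).getD 0)]) acc.1
  | [], _ => rfl
  | x :: l, acc => by
      simp only [List.foldl_cons]
      exact scan_fst_general a l _

theorem currentScan_fst (a : List Int) (nn : Nat) :
    (currentScan a (nn : Int)).1 =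
      (List.range nn).map (fun i =>
        ((PySem.List.max? (a.drop i) (fun y => y)).getD 0,
         (PySem.List.min? (a.take (i + 1)) (fun y => y)).getD 0)) := by
  rw [currentScan, scan_fst_general]
  induction nn with
  | zero => simp
  | succ m ih =>
    have hcast : ((m + 1 : Nat) : Int) = (m : Int) + 1 := by push_cast; ring
    rw [hcast, PySem.List.pyRange_one_succ_right (by positivity), List.foldl_append]
    simp only [List.foldl_cons, List.foldl_nil]
    rw [ih, List.range_succ, List.map_append,
        show ((m : Int) + 1) = ((m + 1 : Nat) : Int) from by push_cast; ring,
        PySem.List.slice_from_natCast, PySem.List.slice_to_natCast]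
    simp

theorem currentPref_eq (a : List Int) (nn : Nat) (hn : nn ≤ a.length) :
    currentPref a (nn : Int) = (List.range (nn + 1)).map (fun i => (a.take i).sum) := by
  induction nn with
  | zero => simp [currentPref]
  | succ m ih =>
    have hm : m ≤ a.length := Nat.le_of_succ_le hn
    have hcast : ((m + 1 : Nat) : Int) = (m : Int) + 1 := by push_cast; ring
    unfold currentPref
    rw [hcast, PySem.List.pyRange_one_succ_right (by positivity), List.foldl_append]
    have : (PySem.List.pyRange 0 (m : Int) 1).foldl (fun p i =>
        p ++ [PySem.List.pyGetD p i 0 + PySem.List.pyGetD a i 0]) [0] = currentPref a (m : Int) := rfl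
    rw [this, ih hm]
    simp only [List.foldl_cons, List.foldl_nil]
    rw [PySem.List.pyGetD_natCast, PySem.List.pyGetD_natCast,
        PySem.List.getD_map_range _ _ _ _ (by omega)]
    have hlt : m < a.length := by omega
    have hga : a.getD m 0 = a[m] := List.getD_eq_getElem a 0 hlt
    rw [hga]
    simp [List.range_succ, sum_take_succ' a m hlt]

theorem currentLoop_eq (a : List Int) (nn : Nat) (hn : nn ≤ a.length) (rem : Int)
    (tmp : List (Int × Int)) (pref : List Int)
    (htmp : tmp = (List.range nn).map (fun i =>
        ((PySem.List.max? (a.drop i) (fun y => y)).getD 0,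
         (PySem.List.min? (a.take (i + 1)) (fun y => y)).getD 0)))
    (hpref : pref = (List.range (nn + 1)).map (fun i => (a.take i).sum))
    (hno : ∀ i ∈ List.range nn,
      (∀ j ∈ List.range (i + 1), (a.take (j + 1)).sum < rem) →
      (a.take (i + 1)).sum - (PySem.List.min? (a.take (i + 1)) (fun y => y)).getD 0
        + (PySem.List.max? (a.drop i) (fun y => y)).getD 0 < rem) :
    ∀ (m j : Nat), j + m = nn →
      (∀ t ∈ List.range j, (a.take (t + 1)).sum < rem) →
      ∀ time : Int,
        currentLoop tmp pref rem (PySem.List.pyRange ((j : Int) + 1) ((nn : Int) + 1) 1) time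
          = some (currentAltLoop rem ((a.take nn).drop j) ((a.take j).sum) time) := by
  intro m
  induction m with
  | zero =>
    intro j hj _ time
    have hj' : j = nn := by omega
    subst hj'
    rw [PySem.List.pyRange_one_eq_nil (by omega)]
    rw [List.drop_of_length_le (by simp)]
    rfl
  | succ m ihm =>
    intro j hj hprev time
    have hjlt : j < nn := by omega
    have hjlen : j < a.length := by omega
    rw [PySem.List.pyRange_one_cons (by omega)]
    have hpj : PySem.List.pyGetD pref ((j : Int) + 1) 0 = (a.take (j + 1)).sum := by
      rw [show ((j : Int) + 1) = ((j + 1 : Nat) : Int) from by push_cast; ring,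
          PySem.List.pyGetD_natCast, hpref,
          PySem.List.getD_map_range _ _ _ _ (by omega)]
    have htj : PySem.List.pyGetD tmp ((j : Int) + 1 - 1) (0, 0) =
        ((PySem.List.max? (a.drop j) (fun y => y)).getD 0,
         (PySem.List.min? (a.take (j + 1)) (fun y => y)).getD 0) := by
      rw [show ((j : Int) + 1 - 1) = ((j : Nat) : Int) from by ring,
          PySem.List.pyGetD_natCast, htmp,
          PySem.List.getD_map_range _ _ _ _ hjlt]
    have hdropj : (a.take nn).drop j = a[j] :: (a.take nn).drop (j + 1) := by
      rw [List.drop_eq_getElem_cons (by simp; omega)]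
      congr 1
      exact List.getElem_take
    rw [currentLoop, hdropj, hpj, htj]
    simp only []
    by_cases hge : (a.take (j + 1)).sum ≥ rem
    · rw [if_pos hge, currentAltLoop]
      rw [← sum_take_succ' a j hjlen, if_pos hge]
    · have hprev' : ∀ t ∈ List.range (j + 1), (a.take (t + 1)).sum < rem := by
        intro t ht
        simp only [List.mem_range] at ht
        rcases Nat.lt_or_ge t j with h | h
        · exact hprev t (by simp [h])
        · have : t = j := by omega
          subst this; omega
      have hhobe := hno j (by simp [hjlt]) (by intro jj hjj; exact hprev' jj hjj)
      rw [if_neg (by omega), if_neg (by omega)]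
      rw [currentAltLoop]
      rw [← sum_take_succ' a j hjlen]
      rw [if_neg (by omega)]
      have := ihm (j + 1) (by omega) hprev' (time + 1)
      rw [show ((j : Int) + 1 + 1) = (((j + 1 : Nat) : Int) + 1) from by push_cast; ring]
      exact this

-- ===== VERDICT (by name: the statement is the Claim_ definition above) =====
theorem current_spec : Claim_equal_current := by
  intro n h_ k a _ hpre
  obtain ⟨hnlen, hs, hcase⟩ := hpre
  rcases lt_or_ge n 0 with hneg | hn0
  · -- n < 0: every loop of A is empty, and B scans max(n,0) = 0 elements
    unfold Spec_current current current_alt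
    simp only [if_neg hs]
    by_cases hm0 : PySem.Int.mod h_ a.sum = 0
    · rw [if_pos hm0, if_pos hm0]
    · rw [if_neg hm0, if_neg hm0,
          PySem.List.pyRange_one_eq_nil (by omega),
          show max n 0 = ((0 : Nat) : Int) from by simp; omega,
          PySem.List.slice_to_natCast]
      simp [currentLoop, currentAltLoop]
  · lift n to Nat using hn0 with nn
    simp only [Int.toNat_natCast] at hcase
    have hlen : nn ≤ a.length := by exact_mod_cast hnlen
    unfold Spec_current current current_alt
    simp only [if_neg hs]
    by_cases hm0 : PySem.Int.mod h_ a.sum = 0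
    · rw [if_pos hm0, if_pos hm0]
    · rw [if_neg hm0, if_neg hm0]
      have hno := hcase.resolve_left hm0
      have hkey := currentLoop_eq a nn hlen (PySem.Int.mod h_ a.sum)
          (currentScan a (nn : Int)).1 (currentPref a (nn : Int))
          (currentScan_fst a nn) (currentPref_eq a nn hlen) hno
          nn 0 (by omega) (by simp)
          (if PySem.Int.floordiv h_ a.sum > 0
            then PySem.Int.floordiv h_ a.sum * (nn : Int) + max 0 (PySem.Int.floordiv h_ a.sum - 1) * k + k
            else PySem.Int.floordiv h_ a.sum * (nn : Int) + max 0 (PySem.Int.floordiv h_ a.sum - 1) * k)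
      simp only [Nat.cast_zero, zero_add, List.drop_zero, List.take_zero, List.sum_nil] at hkey
      rw [hkey, max_eq_left (Int.natCast_nonneg nn), PySem.List.slice_to_natCast]
      simp
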